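-- pv_equiv track=rewrite | github.com/v-kostyukov/ithillel-Introduction-Python | HW11/my_pack/mod2.py | count_first
-- ===== SOURCE A (Python) =====
-- def count_first(n: int) -> str:
--     k = 1
--     res = ''
--     for i in range(1, n + 1):
--         res = ' '.join([res, str(k)])
--         if i == k * (k + 1) // 2:
--             k += 1
--     return res
-- ===== SOURCE B (Python) =====
-- def count_first(n: int) -> str:
--     tokens = []
--     v = 1
--     while len(tokens) < n:
--         tokens.extend([str(v)] * v)
--         v += 1
--     return ' '.join([''] + tokens[:n])
-- ===== Notes on version B (the rewrite author's own statement) =====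
-- stated objective: faster
-- what changed: A scans indices 1..n keeping a running counter k with a triangular-boundary branch and rebuilds the result string with ' '.join every iteration; B generates the token list run by run (v copies of str(v) at a time) with no per-index branch, truncates to n tokens and joins once.
import Mathlib
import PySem

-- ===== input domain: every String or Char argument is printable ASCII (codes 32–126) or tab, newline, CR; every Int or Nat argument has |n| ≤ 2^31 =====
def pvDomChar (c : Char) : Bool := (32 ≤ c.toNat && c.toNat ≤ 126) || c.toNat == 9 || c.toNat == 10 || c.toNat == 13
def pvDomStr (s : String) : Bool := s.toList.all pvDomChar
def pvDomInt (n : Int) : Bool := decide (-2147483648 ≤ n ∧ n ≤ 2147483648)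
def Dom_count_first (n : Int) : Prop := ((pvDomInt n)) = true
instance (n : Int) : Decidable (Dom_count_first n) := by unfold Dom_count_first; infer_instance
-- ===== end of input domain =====

-- B builds the sequence run by run (v copies of str(v)) and joins once, instead of A's
-- per-index scan with a running counter and triangular-boundary branch; same return value.


-- ===== PORT A =====
-- literal port of A: fold over range(1, n+1) carrying (k, res);
-- ' '.join([res, str(k)]) is PySem.Str.join " " [res, str k]; '//' is floordiv.
def count_first (n : Int) : String :=
  ((PySem.List.pyRange 1 (n + 1) 1).foldl
    (fun (st : Int × String) i =>
      let res := PySem.Str.join " " [st.2, PySem.Int.toStr st.1]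
      if i = PySem.Int.floordiv (st.1 * (st.1 + 1)) 2 then (st.1 + 1, res) else (st.1, res))
    (1, "")).2

-- ===== PORT B =====
-- the while-loop of Source B: extend tokens with v copies of str(v) while len(tokens) < n
def buildTokens (n : Int) (v : Int) (hv : 0 < v) (tokens : List String) : List String :=
  if h : (tokens.length : Int) < n then
    buildTokens n (v + 1) (by omega) (tokens ++ List.replicate v.toNat (PySem.Int.toStr v))
  else tokens
termination_by (n - tokens.length).toNat
decreasing_by
  simp only [List.length_append, List.length_replicate]
  omega

def count_first_alt (n : Int) : String :=
  let tokens := buildTokens n 1 (by omega) []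
  PySem.Str.join " " ("" :: PySem.List.slice tokens none (some n))

-- ===== PRECONDITION & SPEC =====
def Spec_count_first (n : Int) (out : String) : Prop := out = count_first_alt n
instance (n : Int) (out : String) : Decidable (Spec_count_first n out) := by unfold Spec_count_first; infer_instance

-- ===== CLAIM (what is proved, stated in full; the proofs are below) =====
def Claim_equal_count_first : Prop := ∀ (n : Int), Dom_count_first n → Spec_count_first n (count_first n)

-- ===== LEMMAS AND PROOFS =====

-- triangular numbers
def T : Nat → Nat
  | 0 => 0
  | k + 1 => T k + (k + 1)

theorem T_lt {a b : Nat} (h : a < b) : T a < T b := by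
  induction b with
  | zero => omega
  | succ b ih =>
    have hT : T (b + 1) = T b + (b + 1) := rfl
    rcases Nat.lt_succ_iff_lt_or_eq.mp h with h' | h'
    · have := ih h'; omega
    · subst h'; omega

theorem two_T (k : Nat) : 2 * T k = k * (k + 1) := by
  induction k with
  | zero => simp [T]
  | succ k ih => simp [T]; ring_nf; ring_nf at ih; omega

-- the run sequence: runs w = [str 1] ++ [str 2, str 2] ++ … (w runs)
def runs (w : Nat) : List String :=
  (List.range w).flatMap (fun j => List.replicate (j + 1) (PySem.Int.toStr ((j : Int) + 1)))

theorem runs_zero : runs 0 = [] := by simp [runs]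

theorem runs_succ (w : Nat) :
    runs (w + 1) = runs w ++ List.replicate (w + 1) (PySem.Int.toStr ((w : Int) + 1)) := by
  simp [runs, List.range_succ]

theorem length_runs (w : Nat) : (runs w).length = T w := by
  induction w with
  | zero => simp [runs_zero, T]
  | succ w ih => simp [runs_succ, ih, T]

theorem runs_get {w k m : Nat} (hk : 0 < k) (h1 : T (k - 1) ≤ m) (h2 : m < T k)
    (hw : k ≤ w) : (runs w)[m]? = some (PySem.Int.toStr ((k : Int))) := by
  induction w with
  | zero => omega
  | succ w ih =>
    rw [runs_succ]
    by_cases hm : m < T w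
    · have hkw : k ≤ w := by
        by_contra hc
        have : w ≤ k - 1 := by omega
        have : T w ≤ T (k-1) := by
          rcases Nat.lt_or_ge w (k-1) with h | h
          · exact le_of_lt (T_lt h)
          · have : w = k - 1 := by omega
            simp [this]
        omega
      rw [List.getElem?_append_left (by rw [length_runs]; omega)]
      exact ih hkw
    · have hkw1 : k = w + 1 := by
        by_contra hc
        rcases Nat.lt_or_ge k (w+1) with h | h
        · have : T k ≤ T w := by
            rcases Nat.lt_or_ge k w with h' | h'
            · exact le_of_lt (T_lt h')
            · have : k = w := by omega
              simp [this]
          omega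
        · have : k - 1 ≥ w + 1 := by omega
          have : T (w+1) ≤ T (k-1) := by
            rcases Nat.lt_or_ge (w+1) (k-1) with h' | h'
            · exact le_of_lt (T_lt h')
            · have : w + 1 = k - 1 := by omega
              simp [this]
          have : T w < T (w+1) := T_lt (by omega)
          omega
      rw [List.getElem?_append_right (by rw [length_runs]; omega)]
      rw [length_runs]
      rw [List.getElem?_replicate]
      subst hkw1
      have hT : T (w+1) = T w + (w+1) := by simp [T]
      have : m - T w < w + 1 := by omega
      simp [this]

-- A's abstract state after m iterations: (k, list of tokens emitted)
def arec : Nat → Nat × List String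
  | 0 => (1, [])
  | m + 1 =>
    let p := arec m
    (if m + 1 = T p.1 then p.1 + 1 else p.1, p.2 ++ [PySem.Int.toStr (p.1 : Int)])

theorem arec_inv (m : Nat) :
    0 < (arec m).1 ∧ T ((arec m).1 - 1) ≤ m ∧ m < T (arec m).1 := by
  induction m with
  | zero => simp [arec, T]
  | succ m ih =>
    obtain ⟨h0, h1, h2⟩ := ih
    simp only [arec]
    split
    · next heq =>
      refine ⟨by omega, by simp; omega, ?_⟩
      have : T ((arec m).1 + 1) = T (arec m).1 + ((arec m).1 + 1) := by simp [T]
      omega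
    · next hne => exact ⟨h0, by omega, by omega⟩

theorem arec_tokens (m w : Nat) (h : m ≤ T w) : (arec m).2 = (runs w).take m := by
  induction m with
  | zero => simp [arec]
  | succ m ih =>
    obtain ⟨h0, h1, h2⟩ := arec_inv m
    have hkw : (arec m).1 ≤ w := by
      by_contra hc
      have : w ≤ (arec m).1 - 1 := by omega
      have : T w ≤ T ((arec m).1 - 1) := by
        rcases Nat.lt_or_ge w ((arec m).1 - 1) with h' | h'
        · exact le_of_lt (T_lt h')
        · have : w = (arec m).1 - 1 := by omega
          simp [this]
      omega
    have hget := runs_get h0 h1 h2 hkw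
    have hm : m < (runs w).length := by rw [length_runs]; omega
    simp only [arec]
    rw [ih (by omega)]
    rw [List.take_add_one, hget]
    simp

-- char-level view of the output: each token prefixed by a space
def tokJoin (ts : List String) : List Char :=
  (ts.map (fun t => ' ' :: t.toList)).flatten

theorem join_pair (a b : String) :
    (PySem.Str.join " " [a, b]).toList = a.toList ++ ' ' :: b.toList := by
  rw [PySem.Str.toList_join]
  rw [show (" " : String).toList = [' '] from rfl]
  simp only [List.map]
  rw [PySem.Chars.join_cons_cons, PySem.Chars.join_singleton]
  simp

theorem join_head (ls : List (List Char)) (l : List Char) :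
    PySem.Chars.join [' '] (l :: ls) = l ++ (ls.map ([' '] ++ ·)).flatten := by
  induction ls generalizing l with
  | nil => rw [PySem.Chars.join_singleton]; simp
  | cons l' ls ih =>
    rw [PySem.Chars.join_cons_cons, ih]
    simp

theorem join_tokens (ts : List String) :
    (PySem.Str.join " " ("" :: ts)).toList = tokJoin ts := by
  rw [PySem.Str.toList_join]
  rw [show (" " : String).toList = [' '] from rfl]
  simp only [List.map]
  rw [show ("" : String).toList = [] from rfl]
  rw [join_head]
  simp only [tokJoin, List.map_map]
  rfl

-- A's fold over range(1, m+1) computes (arec m) up to string/char coercion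
theorem floordiv_tri (k : Nat) :
    PySem.Int.floordiv ((k : Int) * ((k : Int) + 1)) 2 = (T k : Int) := by
  have h2 : ((k : Int) * ((k : Int) + 1)) = ((k * (k + 1) : Nat) : Int) := by push_cast; ring
  rw [h2, show (2 : Int) = ((2 : Nat) : Int) from rfl, PySem.Int.floordiv_natCast]
  have := two_T k
  congr 1
  omega

theorem foldA (m : Nat) :
    ((PySem.List.pyRange 1 ((m : Int) + 1) 1).foldl
      (fun (st : Int × String) i =>
        let res := PySem.Str.join " " [st.2, PySem.Int.toStr st.1]
        if i = PySem.Int.floordiv (st.1 * (st.1 + 1)) 2 then (st.1 + 1, res) else (st.1, res))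
      (1, "")).1 = ((arec m).1 : Int)
    ∧ ((PySem.List.pyRange 1 ((m : Int) + 1) 1).foldl
      (fun (st : Int × String) i =>
        let res := PySem.Str.join " " [st.2, PySem.Int.toStr st.1]
        if i = PySem.Int.floordiv (st.1 * (st.1 + 1)) 2 then (st.1 + 1, res) else (st.1, res))
      (1, "")).2.toList = tokJoin (arec m).2 := by
  induction m with
  | zero =>
    rw [show ((0 : Nat) : Int) + 1 = 1 from rfl, PySem.List.pyRange_one_eq_nil (by omega)]
    simp [arec, tokJoin]
  | succ m ih =>
    obtain ⟨ih1, ih2⟩ := ih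
    have hsplit : PySem.List.pyRange 1 ((↑(m + 1) : Int) + 1) 1
        = PySem.List.pyRange 1 ((m : Int) + 1) 1 ++ [(m : Int) + 1] := by
      rw [show ((↑(m + 1) : Int) + 1) = ((m : Int) + 1) + 1 by push_cast; ring]
      exact PySem.List.pyRange_one_succ_right (by omega)
    rw [hsplit, List.foldl_append]
    set st := (PySem.List.pyRange 1 ((m : Int) + 1) 1).foldl
      (fun (st : Int × String) i =>
        let res := PySem.Str.join " " [st.2, PySem.Int.toStr st.1]
        if i = PySem.Int.floordiv (st.1 * (st.1 + 1)) 2 then (st.1 + 1, res) else (st.1, res))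
      (1, "") with hst
    simp only [List.foldl_cons, List.foldl_nil]
    rw [ih1, floordiv_tri]
    have hcond : ((m : Int) + 1 = ((T (arec m).1 : Nat) : Int)) ↔ (m + 1 = T (arec m).1) := by
      constructor <;> intro h <;> [exact_mod_cast h; exact_mod_cast congrArg (Nat.cast : Nat → Int) h]
    have hjoin : (PySem.Str.join " " [st.2, PySem.Int.toStr ((arec m).1 : Int)]).toList
        = tokJoin ((arec m).2 ++ [PySem.Int.toStr ((arec m).1 : Int)]) := by
      rw [join_pair, ih2]
      simp [tokJoin]
    by_cases h : m + 1 = T (arec m).1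
    · rw [if_pos (hcond.mpr h)]
      simp only [arec, if_pos h]
      exact ⟨by push_cast; ring, hjoin⟩
    · rw [if_neg (fun hc => h (hcond.mp hc))]
      simp only [arec, if_neg h]
      exact ⟨trivial, hjoin⟩

theorem buildTokens_runs (n : Int) :
    ∀ (N : Nat) (v : Int) (hv : 0 < v) (tokens : List String) (w : Nat),
      v = (w : Int) + 1 → tokens = runs w → (n - tokens.length).toNat ≤ N →
      ∃ W : Nat, buildTokens n v hv tokens = runs W ∧ n ≤ ((T W : Nat) : Int) := by
  intro N
  induction N with
  | zero =>
    intro v hv tokens w hvw htok hle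
    have hstop : ¬ ((tokens.length : Int) < n) := by omega
    rw [buildTokens, dif_neg hstop]
    refine ⟨w, htok, ?_⟩
    rw [htok, length_runs] at hstop
    omega
  | succ N ih =>
    intro v hv tokens w hvw htok hle
    rw [buildTokens]
    by_cases h : ((tokens.length : Int) < n)
    · rw [dif_pos h]
      have hstep : tokens ++ List.replicate v.toNat (PySem.Int.toStr v) = runs (w + 1) := by
        rw [htok, runs_succ, hvw]
        rw [show ((w : Int) + 1).toNat = w + 1 by omega]
      refine ih (v + 1) (by omega) _ (w + 1) (by omega) hstep ?_
      have hlen : (tokens ++ List.replicate v.toNat (PySem.Int.toStr v)).length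
          = tokens.length + v.toNat := by simp
      omega
    · rw [dif_neg h]
      refine ⟨w, htok, ?_⟩
      rw [htok, length_runs] at h
      omega

theorem toList_injective (a b : String) (h : a.toList = b.toList) : a = b :=
  String.toList_inj.mp h

-- ===== VERDICT (by name: the statement is the Claim_ definition above) =====
theorem count_first_spec : Claim_equal_count_first := by
  intro n _
  unfold Spec_count_first count_first count_first_alt
  by_cases hn : n ≤ 0
  · rw [PySem.List.pyRange_one_eq_nil (by omega)]
    rw [show buildTokens n 1 (by omega) [] = [] by rw [buildTokens, dif_neg (by simpa using hn)]]
    simp only [List.foldl_nil]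
    apply toList_injective
    rw [join_tokens]
    simp [PySem.List.slice, tokJoin]
  · obtain ⟨W, hB, hW⟩ := buildTokens_runs n n.toNat 1 (by omega) [] 0 (by simp) (by rw [runs_zero]) (by simp)
    simp only [hB]
    apply toList_injective
    rw [join_tokens]
    have hm : n = ((n.toNat : Nat) : Int) := by omega
    rw [hm, PySem.List.slice_to_natCast]
    rw [(foldA n.toNat).2]
    rw [arec_tokens n.toNat W (by omega)]
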